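-- pv_equiv track=rewrite | github.com/trevorurquhart/aoc | 2024/question15/Question15.py | parse_grid_two
-- ===== SOURCE A (Python) =====
-- def parse_grid_two(lines):
--     grid = []
--     outputs = {'#': ['#', '#'], 'O': ['[', ']'], '.': ['.', '.'], '@': ['@', '.']}
--     for y, line in enumerate(lines):
--         row = []
--         for c in line:
--             row.extend(outputs[c])
--             if c == '@':
--                 robot = y, len(row) -2
--         grid.append(row)
--
--     return grid, robot
-- ===== SOURCE B (Python) =====
-- def parse_grid_two(lines):
--     outputs = {'#': ['#', '#'], 'O': ['[', ']'], '.': ['.', '.'], '@': ['@', '.']}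
--     grid = [[h for c in line for h in outputs[c]] for line in lines]
--     for y, line in enumerate(lines):
--         for x, c in enumerate(line):
--             if c == '@':
--                 robot = y, 2 * x
--     return grid, robot
-- ===== Notes on version B (the rewrite author's own statement) =====
-- stated objective: simpler
-- what changed: B builds the doubled grid in one nested comprehension and finds the robot in a separate index-based pass (robot = (y, 2*x), last '@' wins), instead of A's single fused loop that tracks the growing row's length.
import Mathlib
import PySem

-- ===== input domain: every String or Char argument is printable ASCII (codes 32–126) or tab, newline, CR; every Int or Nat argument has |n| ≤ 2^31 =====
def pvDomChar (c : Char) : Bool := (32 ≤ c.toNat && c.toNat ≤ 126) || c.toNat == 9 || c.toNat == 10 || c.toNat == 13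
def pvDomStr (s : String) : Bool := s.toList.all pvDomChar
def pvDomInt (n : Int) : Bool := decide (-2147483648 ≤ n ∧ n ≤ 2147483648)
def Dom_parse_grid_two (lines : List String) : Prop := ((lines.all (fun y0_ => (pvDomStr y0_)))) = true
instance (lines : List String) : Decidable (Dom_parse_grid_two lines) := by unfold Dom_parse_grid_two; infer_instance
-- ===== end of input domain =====

-- B: builds the doubled grid with one nested comprehension and finds the robot in a separate
-- index-based pass (robot = (y, 2*x), last '@' wins) — simpler decomposition, same cost.

-- the Python dict 'outputs', shared by both ports (both Pythons use the same literal dict)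
def pvOutputs : PySem.Dict Char (List String) :=
  PySem.Dict.ofList [('#', ["#", "#"]), ('O', ["[", "]"]), ('.', [".", "."]), ('@', ["@", "."])]

-- ===== PORT A =====
-- A's single fused loop: robot is a possibly-unbound variable → Option, Pre_ guarantees some.
-- outputs[c] raises KeyError on other chars → getD [] there, excluded by Pre_.
def parse_grid_two (lines : List String) : List (List String) × (Int × Int) :=
  let st := (PySem.List.enumerate lines).foldl
    (fun (st : List (List String) × Option (Int × Int)) yl =>
      let inner := yl.2.toList.foldl
        (fun (st2 : List String × Option (Int × Int)) c =>
          let row := st2.1 ++ pvOutputs.getD c []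
          (row, if c = '@' then some (yl.1, (row.length : Int) - 2) else st2.2))
        ([], st.2)
      (st.1 ++ [inner.1], inner.2))
    ([], (none : Option (Int × Int)))
  (st.1, st.2.getD (0, 0))

-- ===== PORT B =====
def parse_grid_two_alt (lines : List String) : List (List String) × (Int × Int) :=
  let grid := lines.map (fun line => line.toList.flatMap (fun c => pvOutputs.getD c []))
  let robot := (PySem.List.enumerate lines).foldl
    (fun r yl => (PySem.List.enumerate yl.2.toList).foldl
      (fun r2 xc => if xc.2 = '@' then some (yl.1, 2 * xc.1) else r2) r)
    (none : Option (Int × Int))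
  (grid, robot.getD (0, 0))

-- ===== PRECONDITION & SPEC =====
-- A raises KeyError on any char outside '#O.@' and UnboundLocalError when no '@' occurs; B raises there too.
def Pre_parse_grid_two (lines : List String) : Prop :=
  (lines.all (fun s => s.toList.all (fun c => c == '#' || c == 'O' || c == '.' || c == '@'))
   && lines.any (fun s => s.toList.any (fun c => c == '@'))) = true
instance (lines : List String) : Decidable (Pre_parse_grid_two lines) := by unfold Pre_parse_grid_two; infer_instance
def pvWitness_parse_grid_two : List String := ["#O.@"]

def Spec_parse_grid_two (lines : List String) (out : List (List String) × (Int × Int)) : Prop := out = parse_grid_two_alt lines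
instance (lines : List String) (out : List (List String) × (Int × Int)) : Decidable (Spec_parse_grid_two lines out) := by unfold Spec_parse_grid_two; infer_instance

-- ===== CLAIM (what is proved, stated in full; the proofs are below) =====
def Claim_equal_parse_grid_two : Prop := ∀ (lines : List String), Dom_parse_grid_two lines → Pre_parse_grid_two lines → Spec_parse_grid_two lines (parse_grid_two lines)

-- ===== LEMMAS AND PROOFS =====

-- every valid char maps to exactly two cells
lemma pvOut_len {c : Char} (h : c = '#' ∨ c = 'O' ∨ c = '.' ∨ c = '@') :
    (pvOutputs.getD c []).length = 2 := by
  rcases h with h | h | h | h <;> subst h <;> decide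

-- inner loop: A's fused fold over one line equals (flatMap for the row, B's indexed fold for the robot),
-- provided the accumulated row so far has even length 2*k matching the enumeration start k.
lemma pv_inner (y : Int) (cs : List Char)
    (hv : ∀ c ∈ cs, c = '#' ∨ c = 'O' ∨ c = '.' ∨ c = '@') :
    ∀ (k : Nat) (row0 : List String) (r0 : Option (Int × Int)), row0.length = 2 * k →
    cs.foldl
      (fun (st2 : List String × Option (Int × Int)) c =>
        let row := st2.1 ++ pvOutputs.getD c []
        (row, if c = '@' then some (y, (row.length : Int) - 2) else st2.2))
      (row0, r0)
    = (row0 ++ cs.flatMap (fun c => pvOutputs.getD c []),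
       (PySem.List.enumerate cs (k : Int)).foldl
         (fun r2 xc => if xc.2 = '@' then some (y, 2 * xc.1) else r2) r0) := by
  induction cs with
  | nil => intro k row0 r0 h; simp [PySem.List.enumerate]
  | cons c cs ih =>
    intro k row0 r0 h
    have hc := hv c (by simp)
    have hlen : (row0 ++ pvOutputs.getD c []).length = 2 * (k + 1) := by
      simp [h, pvOut_len hc]; omega
    have := ih (fun c hm => hv c (by simp [hm])) (k + 1) (row0 ++ pvOutputs.getD c [])
      (if c = '@' then some (y, ((row0 ++ pvOutputs.getD c []).length : Int) - 2) else r0) hlen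
    simp only [List.foldl_cons, PySem.List.enumerate_cons]
    rw [this]
    have h2 : ((row0 ++ pvOutputs.getD c []).length : Int) - 2 = 2 * (k : Int) := by
      rw [hlen]; push_cast; ring
    have h3 : ((k : Int) + 1) = ((k + 1 : Nat) : Int) := by push_cast; ring
    rw [h2, ← h3]
    simp

-- outer loop: A's fold over enumerated lines equals (mapped grid, B's nested robot fold)
lemma pv_outer (ls : List String)
    (hv : ∀ s ∈ ls, ∀ c ∈ s.toList, c = '#' ∨ c = 'O' ∨ c = '.' ∨ c = '@') :
    ∀ (y : Int) (g0 : List (List String)) (r0 : Option (Int × Int)),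
    (PySem.List.enumerate ls y).foldl
      (fun (st : List (List String) × Option (Int × Int)) yl =>
        let inner := yl.2.toList.foldl
          (fun (st2 : List String × Option (Int × Int)) c =>
            let row := st2.1 ++ pvOutputs.getD c []
            (row, if c = '@' then some (yl.1, (row.length : Int) - 2) else st2.2))
          ([], st.2)
        (st.1 ++ [inner.1], inner.2))
      (g0, r0)
    = (g0 ++ ls.map (fun line => line.toList.flatMap (fun c => pvOutputs.getD c [])),
       (PySem.List.enumerate ls y).foldl
         (fun r yl => (PySem.List.enumerate yl.2.toList).foldl
           (fun r2 xc => if xc.2 = '@' then some (yl.1, 2 * xc.1) else r2) r) r0) := by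
  induction ls with
  | nil => intro y g0 r0; simp [PySem.List.enumerate]
  | cons s ls ih =>
    intro y g0 r0
    simp only [PySem.List.enumerate_cons, List.foldl_cons, List.map_cons]
    rw [pv_inner y s.toList (hv s (by simp)) 0 [] r0 (by simp)]
    rw [ih (fun t ht => hv t (by simp [ht])) (y + 1)]
    simp

-- ===== VERDICT (by name: the statement is the Claim_ definition above) =====
theorem parse_grid_two_spec : Claim_equal_parse_grid_two := by
  intro lines _ hpre
  unfold Pre_parse_grid_two at hpre
  simp only [Bool.and_eq_true, List.all_eq_true, List.any_eq_true, Bool.or_eq_true,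
    beq_iff_eq] at hpre
  unfold Spec_parse_grid_two parse_grid_two parse_grid_two_alt
  rw [pv_outer lines (fun t ht c hc => by have := hpre.1 t ht c hc; tauto) 0 [] none]
  simp
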